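-- pv_equiv track=rewrite | github.com/xvade/LeanHackathon2026 | aesop_collect/scripts/collect_aesop_messages.py | extract_aesop_collect_blocks
-- ===== SOURCE A (Python) =====
-- def extract_aesop_collect_blocks(text: str) -> list[str]:
--     blocks: list[str] = []
--     current: list[str] | None = None
--     bracket_balance = 0
--
--     for line in text.splitlines():
--         stripped = line.strip()
--         starts_block = stripped.startswith("aesop_collect:") or stripped.startswith(
--             "info: aesop_collect:"
--         )
--
--         if current is None:
--             if not starts_block:
--                 continue
--             current = [line]
--             bracket_balance = line.count("[") - line.count("]")
--             if bracket_balance <= 0: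
--                 blocks.append("\n".join(current))
--                 current = None
--             continue
--
--         current.append(line)
--         bracket_balance += line.count("[") - line.count("]")
--         if bracket_balance <= 0:
--             blocks.append("\n".join(current))
--             current = None
--
--     if current is not None:
--         blocks.append("\n".join(current))
--     return blocks
-- ===== SOURCE B (Python) =====
-- def extract_aesop_collect_blocks(text: str) -> list[str]:
--     lines = text.splitlines()
--     n = len(lines)
--     blocks: list[str] = []
--     i = 0
--     while i < n:
--         line = lines[i]
--         stripped = line.strip()
--         i += 1
--         if not (stripped.startswith("aesop_collect:")
--                 or stripped.startswith("info: aesop_collect:")):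
--             continue
--         block = [line]
--         balance = line.count("[") - line.count("]")
--         while balance > 0 and i < n:
--             block.append(lines[i])
--             balance += lines[i].count("[") - lines[i].count("]")
--             i += 1
--         blocks.append("\n".join(block))
--     return blocks
-- ===== Notes on version B (the rewrite author's own statement) =====
-- stated objective: alternative
-- what changed: Replaces A's single fold with a current/None sentinel and running balance state by an index-based outer scan for start lines with a dedicated inner loop that consumes a block's continuation lines until the bracket balance closes.
import Mathlib
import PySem

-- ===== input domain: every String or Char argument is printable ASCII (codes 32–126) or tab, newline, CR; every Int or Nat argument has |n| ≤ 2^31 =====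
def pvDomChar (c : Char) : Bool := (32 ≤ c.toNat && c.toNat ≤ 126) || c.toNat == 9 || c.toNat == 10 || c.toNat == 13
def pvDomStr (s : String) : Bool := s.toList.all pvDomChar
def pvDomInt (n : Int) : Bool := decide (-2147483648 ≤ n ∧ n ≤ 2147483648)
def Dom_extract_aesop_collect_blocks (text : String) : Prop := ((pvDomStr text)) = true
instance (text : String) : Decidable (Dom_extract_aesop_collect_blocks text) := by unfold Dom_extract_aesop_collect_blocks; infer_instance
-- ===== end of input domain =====

-- B replaces A's sentinel-state fold by an outer start-line scan with an inner block-consuming loop (alternative decomposition, same cost).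

-- ===== PORT A =====
-- one fold step of A's loop; state = (blocks, current, bracket_balance)
def pvStepA (st : List String × Option (List String) × Int) (line : String) :
    List String × Option (List String) × Int :=
  let stripped := PySem.Str.strip line
  let starts_block := PySem.Str.startswith stripped "aesop_collect:" ||
    PySem.Str.startswith stripped "info: aesop_collect:"
  match st with
  | (blocks, none, bal) =>
    if !starts_block then (blocks, none, bal)
    else
      let bal' : Int := (PySem.Str.count line "[" : Int) - (PySem.Str.count line "]" : Int)
      if bal' ≤ 0 then (blocks ++ [PySem.Str.join "\n" [line]], none, bal')
      else (blocks, some [line], bal')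
  | (blocks, some cur, bal) =>
    let bal' : Int := bal + (PySem.Str.count line "[" : Int) - (PySem.Str.count line "]" : Int)
    if bal' ≤ 0 then (blocks ++ [PySem.Str.join "\n" (cur ++ [line])], none, bal')
    else (blocks, some (cur ++ [line]), bal')

def extract_aesop_collect_blocks (text : String) : List String :=
  let st := (PySem.Str.splitlines text).foldl pvStepA ([], none, 0)
  match st with
  | (blocks, none, _) => blocks
  | (blocks, some cur, _) => blocks ++ [PySem.Str.join "\n" cur]

-- ===== PORT B =====
-- inner while loop: consume lines while balance > 0; returns (consumed block tail, remaining lines)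
def pvInnerB : List String → Int → List String × List String
  | rest, bal =>
    if bal ≤ 0 then ([], rest)
    else
      match rest with
      | [] => ([], [])
      | l :: rs =>
        let p := pvInnerB rs (bal + (PySem.Str.count l "[" : Int) - (PySem.Str.count l "]" : Int))
        (l :: p.1, p.2)
  termination_by rest _ => rest.length
  decreasing_by simp

-- the remaining lines are a suffix of the input lines (termination of the outer loop)
theorem pvInnerB_len (rest : List String) (bal : Int) : (pvInnerB rest bal).2.length ≤ rest.length := by
  induction rest generalizing bal with
  | nil => unfold pvInnerB; dsimp; split <;> simp
  | cons l rs ih =>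
    unfold pvInnerB; dsimp; split
    · simp
    · simpa using Nat.le_succ_of_le (ih _)

-- outer while loop over the line list
def pvOuterB : List String → List String
  | [] => []
  | line :: rest =>
    let stripped := PySem.Str.strip line
    if PySem.Str.startswith stripped "aesop_collect:" ||
       PySem.Str.startswith stripped "info: aesop_collect:" then
      let bal : Int := (PySem.Str.count line "[" : Int) - (PySem.Str.count line "]" : Int)
      let p := pvInnerB rest bal
      PySem.Str.join "\n" (line :: p.1) :: pvOuterB p.2
    else
      pvOuterB rest
  termination_by l => l.length
  decreasing_by
  · exact Nat.lt_succ_of_le (pvInnerB_len _ _)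
  · simp

def extract_aesop_collect_blocks_alt (text : String) : List String :=
  pvOuterB (PySem.Str.splitlines text)

-- ===== PRECONDITION & SPEC =====
def Spec_extract_aesop_collect_blocks (text : String) (out : List String) : Prop := out = extract_aesop_collect_blocks_alt text
instance (text : String) (out : List String) : Decidable (Spec_extract_aesop_collect_blocks text out) := by unfold Spec_extract_aesop_collect_blocks; infer_instance

-- ===== CLAIM (what is proved, stated in full; the proofs are below) =====
def Claim_equal_extract_aesop_collect_blocks : Prop := ∀ (text : String), Dom_extract_aesop_collect_blocks text → Spec_extract_aesop_collect_blocks text (extract_aesop_collect_blocks text)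

-- ===== LEMMAS AND PROOFS =====

-- abbreviations for the proofs (the ports themselves spell these out literally)
def pvStarts (l : String) : Bool :=
  PySem.Str.startswith (PySem.Str.strip l) "aesop_collect:" ||
    PySem.Str.startswith (PySem.Str.strip l) "info: aesop_collect:"

def pvBal (l : String) : Int := (PySem.Str.count l "[" : Int) - (PySem.Str.count l "]" : Int)

theorem pvStepA_none_skip (l : String) (blocks : List String) (bal : Int)
    (h : pvStarts l = false) : pvStepA (blocks, none, bal) l = (blocks, none, bal) := by
  simp only [pvStepA, pvStarts] at h ⊢; rw [h]; rfl

theorem pvStepA_none_close (l : String) (blocks : List String) (bal : Int)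
    (h : pvStarts l = true) (h2 : pvBal l ≤ 0) :
    pvStepA (blocks, none, bal) l = (blocks ++ [PySem.Str.join "\n" [l]], none, pvBal l) := by
  simp only [pvStepA, pvStarts, pvBal] at h h2 ⊢
  rw [h, if_neg (by decide), if_pos h2]

theorem pvStepA_none_open (l : String) (blocks : List String) (bal : Int)
    (h : pvStarts l = true) (h2 : ¬ pvBal l ≤ 0) :
    pvStepA (blocks, none, bal) l = (blocks, some [l], pvBal l) := by
  simp only [pvStepA, pvStarts, pvBal] at h h2 ⊢
  rw [h, if_neg (by decide), if_neg h2]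

theorem pvStepA_some_close (l : String) (blocks cur : List String) (bal : Int)
    (h2 : bal + pvBal l ≤ 0) :
    pvStepA (blocks, some cur, bal) l
      = (blocks ++ [PySem.Str.join "\n" (cur ++ [l])], none, bal + pvBal l) := by
  simp only [pvStepA, pvBal, ← add_sub_assoc] at h2 ⊢
  rw [if_pos h2]

theorem pvStepA_some_open (l : String) (blocks cur : List String) (bal : Int)
    (h2 : ¬ bal + pvBal l ≤ 0) :
    pvStepA (blocks, some cur, bal) l = (blocks, some (cur ++ [l]), bal + pvBal l) := by
  simp only [pvStepA, pvBal, ← add_sub_assoc] at h2 ⊢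
  rw [if_neg h2]

theorem pvInnerB_done (rest : List String) (bal : Int) (h : bal ≤ 0) :
    pvInnerB rest bal = ([], rest) := by
  rw [pvInnerB.eq_def]; simp [h]

theorem pvInnerB_cons (l : String) (rs : List String) (bal : Int) (h : ¬ bal ≤ 0) :
    pvInnerB (l :: rs) bal
      = (l :: (pvInnerB rs (bal + pvBal l)).1, (pvInnerB rs (bal + pvBal l)).2) := by
  simp only [pvBal, ← add_sub_assoc]
  rw [pvInnerB.eq_def]; dsimp only; rw [if_neg h]

theorem pvOuterB_cons_skip (l : String) (rest : List String) (h : pvStarts l = false) :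
    pvOuterB (l :: rest) = pvOuterB rest := by
  rw [pvOuterB.eq_def]; simp only [pvStarts] at h
  dsimp only; rw [h, if_neg (by decide)]

theorem pvOuterB_cons_start (l : String) (rest : List String) (h : pvStarts l = true) :
    pvOuterB (l :: rest)
      = PySem.Str.join "\n" (l :: (pvInnerB rest (pvBal l)).1)
          :: pvOuterB (pvInnerB rest (pvBal l)).2 := by
  simp only [pvBal]
  rw [pvOuterB.eq_def]; simp only [pvStarts] at h
  dsimp only; rw [h, if_pos rfl]

-- A's end-of-loop flush, as a function of the fold state
def pvFinalizeA : List String × Option (List String) × Int → List String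
  | (blocks, none, _) => blocks
  | (blocks, some cur, _) => blocks ++ [PySem.Str.join "\n" cur]

-- joint invariant: A's fold started with no current block / with an open block agrees with B's outer / inner loop
theorem pvMain (lines : List String) :
    (∀ (blocks : List String) (bal : Int),
      pvFinalizeA (lines.foldl pvStepA (blocks, none, bal)) = blocks ++ pvOuterB lines)
    ∧ (∀ (blocks cur : List String) (bal : Int), 0 < bal →
      pvFinalizeA (lines.foldl pvStepA (blocks, some cur, bal)) =
        blocks ++ PySem.Str.join "\n" (cur ++ (pvInnerB lines bal).1)
          :: pvOuterB (pvInnerB lines bal).2) := by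
  induction lines with
  | nil =>
    refine ⟨fun blocks bal => by rw [pvOuterB.eq_def]; simp [pvFinalizeA], ?_⟩
    intro blocks cur bal hbal
    rw [pvInnerB.eq_def]
    simp only [show ¬ bal ≤ 0 by omega, if_neg, not_false_iff]
    rw [pvOuterB.eq_def]
    simp [pvFinalizeA]
  | cons l ls ih =>
    constructor
    · intro blocks bal
      rw [List.foldl_cons]
      by_cases hs : pvStarts l = true
      · by_cases hle : pvBal l ≤ 0
        · rw [pvStepA_none_close l blocks bal hs hle, ih.1,
            pvOuterB_cons_start l ls hs, pvInnerB_done ls (pvBal l) hle]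
          simp
        · rw [pvStepA_none_open l blocks bal hs hle, ih.2 blocks [l] (pvBal l) (by omega),
            pvOuterB_cons_start l ls hs]
          simp
      · rw [pvStepA_none_skip l blocks bal (by simpa using hs), ih.1,
          pvOuterB_cons_skip l ls (by simpa using hs)]
    · intro blocks cur bal hbal
      rw [List.foldl_cons, pvInnerB_cons l ls bal (by omega)]
      by_cases hle : bal + pvBal l ≤ 0
      · rw [pvStepA_some_close l blocks cur bal hle, ih.1,
          pvInnerB_done ls (bal + pvBal l) hle]
        simp
      · rw [pvStepA_some_open l blocks cur bal hle, ih.2 blocks (cur ++ [l]) (bal + pvBal l) (by omega)]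
        simp

-- ===== VERDICT (by name: the statement is the Claim_ definition above) =====
theorem extract_aesop_collect_blocks_spec : Claim_equal_extract_aesop_collect_blocks := by
  intro text _
  unfold Spec_extract_aesop_collect_blocks extract_aesop_collect_blocks extract_aesop_collect_blocks_alt
  have h := (pvMain (PySem.Str.splitlines text)).1 [] 0
  simp only [List.nil_append] at h
  rw [← h]
  rcases (PySem.Str.splitlines text).foldl pvStepA ([], none, 0) with ⟨blocks, cur, bal⟩
  cases cur <;> rfl
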